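-- pv_equiv track=rewrite | github.com/tomy9729/Algorithm | Programmers/Level 3/불량 사용자.py | solution
-- ===== SOURCE A (Python) =====
-- from itertools import product
--
-- def solution(user_id, banned_id):
--     answer = 0
--     ban_id = [[] for i in range(len(banned_id))]
--     ban_num = []
--     for i in range(len(banned_id)) :
--         ban_num.append(0)
--     for i in range(len(user_id)) :
--         for j in range(len(banned_id)) :
--             for l in range(len(banned_id[j])):
--                 if len(user_id[i]) > l and len(user_id[i]) == len(banned_id[j]):
--                     if user_id[i][l] == banned_id[j][l] : pass
--                     elif banned_id[j][l] == '*' : pass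
--                     elif user_id[i][l] != banned_id[j][l] : break;
--
--                     if l == len(banned_id[j])-1 :
--                         ban_num[j] += 1
--                         ban_id[j].append(user_id[i])
--     max_ = 1
--     for i in range(len(ban_num)):
--         max_ *= ban_num[i]
--     ban_id2 = set([frozenset(a) for a in product(*ban_id) if len(frozenset(a))==len(banned_id)])
--     ban_id2 = list(ban_id2)
--     answer = len(ban_id2)
--     return answer
-- ===== SOURCE B (Python) =====
-- def solution(user_id, banned_id):
--     def _match(u, b):
--         return len(u) == len(b) and all(x == y or y == '*' for x, y in zip(u, b))
--
--     users = list(dict.fromkeys(user_id))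
--     cands = [[u for u in users if _match(u, b)] for b in banned_id]
--     found = set()
--
--     def dfs(rest, chosen):
--         if not rest:
--             found.add(frozenset(chosen))
--             return
--         for u in rest[0]:
--             if u not in chosen:
--                 chosen.append(u)
--                 dfs(rest[1:], chosen)
--                 chosen.pop()
--
--     dfs(cands, [])
--     return len(found)
-- ===== Notes on version B (the rewrite author's own statement) =====
-- stated objective: alternative
-- what changed: B replaces A's full cartesian product over the per-pattern candidate lists (distinctness filtered only at the end, duplicates kept) by a backtracking search that picks a distinct user for each banned pattern with early pruning of repeated users, after deduplicating user_id up front.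
-- outside the precondition, e.g. on solution([''], ['']): A returns 0, B returns 1
import Mathlib
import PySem

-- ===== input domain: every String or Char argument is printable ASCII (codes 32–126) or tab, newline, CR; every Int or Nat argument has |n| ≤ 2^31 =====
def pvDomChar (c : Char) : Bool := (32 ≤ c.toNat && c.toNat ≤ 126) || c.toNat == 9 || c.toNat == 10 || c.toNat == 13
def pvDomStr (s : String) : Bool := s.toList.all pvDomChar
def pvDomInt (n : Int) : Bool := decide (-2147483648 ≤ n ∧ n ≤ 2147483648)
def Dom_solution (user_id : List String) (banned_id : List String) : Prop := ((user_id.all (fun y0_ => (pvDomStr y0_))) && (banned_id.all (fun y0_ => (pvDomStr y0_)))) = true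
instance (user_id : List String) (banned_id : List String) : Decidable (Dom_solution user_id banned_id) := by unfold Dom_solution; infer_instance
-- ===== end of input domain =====

-- B replaces A's full cartesian product over the per-pattern candidate lists (filtered for
-- distinctness only at the end) by a backtracking search that picks distinct users pattern by
-- pattern, pruning repeated users early and deduplicating user_id up front (objective: alternative).

-- shared helper, the port of Python's `frozenset` applied to a list of strings: modelled
-- canonically as the SORTED list of the distinct elements, so that equality of the canonical
-- lists coincides with Python's frozenset (set) equality and len is the number of elements.
def pyFrozenset (xs : List String) : List String :=
  (PySem.Set.ofList xs).mergeSort (fun a b => decide (a ≤ b))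

-- ===== PORT A =====
-- A's inner `for l in range(len(banned_id[j]))` loop: `break` on a real mismatch, the
-- candidate is recorded exactly when the loop body runs at l = len-1 without breaking.
def aMatchLoop (u b : List Char) (l : Nat) : Bool :=
  if l < b.length then
    if u.length > l && u.length == b.length then
      if u.getD l ' ' == b.getD l ' ' then
        (if l == b.length - 1 then true else aMatchLoop u b (l+1))
      else if b.getD l ' ' == '*' then
        (if l == b.length - 1 then true else aMatchLoop u b (l+1))
      else false
    else aMatchLoop u b (l+1)
  else false
  termination_by b.length - l

-- itertools.product(*ban_id), in itertools' order (rightmost factor varies fastest)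
def pyProduct : List (List String) → List (List String)
  | [] => [[]]
  | xs :: rest => xs.flatMap (fun x => (pyProduct rest).map (fun t => x :: t))

def solution (user_id : List String) (banned_id : List String) : Int :=
  let ban_id0 : List (List String) :=
    (PySem.List.pyRange 0 (PySem.List.len banned_id) 1).map (fun _ => ([] : List String))
  let ban_num0 : List Int :=
    (PySem.List.pyRange 0 (PySem.List.len banned_id) 1).foldl (fun acc _ => acc ++ [(0 : Int)]) []
  let st :=
    (PySem.List.pyRange 0 (PySem.List.len user_id) 1).foldl (fun st i =>
      let u := PySem.List.pyGetD user_id i ""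
      (PySem.List.pyRange 0 (PySem.List.len banned_id) 1).foldl (fun st j =>
        if aMatchLoop u.toList (PySem.List.pyGetD banned_id j "").toList 0 then
          (PySem.List.pySetD st.1 j (PySem.List.pyGetD st.1 j 0 + 1),
           PySem.List.pySetD st.2 j (PySem.List.pyGetD st.2 j [] ++ [u]))
        else st) st) (ban_num0, ban_id0)
  let ban_num := st.1
  let ban_id := st.2
  let _max :=
    (PySem.List.pyRange 0 (PySem.List.len ban_num) 1).foldl
      (fun m i => m * PySem.List.pyGetD ban_num i 0) 1
  let ban_id2 : PySem.Set (List String) :=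
    PySem.Set.ofList
      (((pyProduct ban_id).filter
          (fun a => PySem.List.len (pyFrozenset a) == PySem.List.len banned_id)).map pyFrozenset)
  PySem.List.len ban_id2

-- ===== PORT B =====
def bMatch (u b : String) : Bool :=
  u.toList.length == b.toList.length &&
    (u.toList.zip b.toList).all (fun p => p.1 == p.2 || p.2 == '*')

def dfs : List (List String) → List String → PySem.Set (List String) → PySem.Set (List String)
  | [], chosen, found => found.add (pyFrozenset chosen)
  | cs :: rest, chosen, found =>
      cs.foldl (fun fd u => if chosen.contains u then fd else dfs rest (chosen ++ [u]) fd) found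

def solution_alt (user_id : List String) (banned_id : List String) : Int :=
  let users := PySem.List.dedup user_id
  let cands := banned_id.map (fun b => users.filter (fun u => bMatch u b))
  let found := dfs cands [] PySem.Set.empty
  PySem.List.len found

-- ===== PRECONDITION & SPEC =====
-- Pre_ excludes only the inputs where BOTH lists contain the empty string: whether an empty
-- banned pattern matches the empty user id is an unspecified degenerate corner on which
-- A (the empty pattern matches nothing) and B (it matches exactly the empty user id)
-- both behave defensibly but differently.
def Pre_solution (user_id : List String) (banned_id : List String) : Prop :=
  ¬("" ∈ banned_id ∧ "" ∈ user_id)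
instance (user_id : List String) (banned_id : List String) : Decidable (Pre_solution user_id banned_id) := by
  unfold Pre_solution; infer_instance

def pvWitness_solution : List String × List String :=
  (["frodo", "fradi", "crodo", "abc123", "frodoc"], ["fr*d*", "abc1**"])

def Spec_solution (user_id : List String) (banned_id : List String) (out : Int) : Prop := out = solution_alt user_id banned_id
instance (user_id : List String) (banned_id : List String) (out : Int) : Decidable (Spec_solution user_id banned_id out) := by unfold Spec_solution; infer_instance

-- ===== CLAIM (what is proved, stated in full; the proofs are below) =====
def Claim_equal_solution : Prop := ∀ (user_id : List String) (banned_id : List String), Dom_solution user_id banned_id → Pre_solution user_id banned_id → Spec_solution user_id banned_id (solution user_id banned_id)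

-- ===== LEMMAS AND PROOFS =====

lemma aMatchLoop_len_ne (u b : List Char) (h : u.length ≠ b.length) :
    ∀ l, aMatchLoop u b l = false := by
  have key : ∀ n l, b.length - l ≤ n → aMatchLoop u b l = false := by
    intro n
    induction n with
    | zero =>
      intro l hl
      unfold aMatchLoop
      have hnb : ¬ l < b.length := by omega
      simp [hnb]
    | succ n ih =>
      intro l hl
      unfold aMatchLoop
      by_cases hb : l < b.length
      · have hne : (u.length == b.length) = false := by simp [h]
        simp [hb, hne, ih (l+1) (by omega)]
      · simp [hb]
  intro l; exact key (b.length - l) l le_rfl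

lemma aMatchLoop_eq_all (u b : List Char) (h : u.length = b.length) (l : Nat) (hl : l < b.length) :
    aMatchLoop u b l = ((u.drop l).zip (b.drop l)).all (fun p => p.1 == p.2 || p.2 == '*') := by
  have key : ∀ n l, b.length - l ≤ n → l < b.length →
      aMatchLoop u b l = ((u.drop l).zip (b.drop l)).all (fun p => p.1 == p.2 || p.2 == '*') := by
    intro n
    induction n with
    | zero => intro l hl hlt; omega
    | succ n ih =>
      intro l hl hlt
      have hul : l < u.length := by omega
      have hcond : (decide (u.length > l) && (u.length == b.length)) = true := by
        simp [h]; omega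
      rw [List.drop_eq_getElem_cons hul, List.drop_eq_getElem_cons hlt]
      unfold aMatchLoop
      rw [List.getD_eq_getElem u ' ' hul, List.getD_eq_getElem b ' ' hlt]
      simp only [hlt, if_true, hcond, List.zip_cons_cons, List.all_cons]
      by_cases hlast : l = b.length - 1
      · have h2 : u.drop (l+1) = [] := List.drop_eq_nil_of_le (by omega)
        have hbeq : (l == b.length - 1) = true := by simp [hlast]
        simp only [hbeq, h2, List.zip_nil_left, List.all_nil]
        by_cases h1 : u[l] = b[l] <;> by_cases h3 : b[l] = '*' <;> simp [h1, h3]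
      · have hbeq : (l == b.length - 1) = false := by simp [hlast]
        have hrec := ih (l+1) (by omega) (by omega)
        simp only [hbeq, hrec]
        by_cases h1 : u[l] = b[l] <;> by_cases h3 : b[l] = '*' <;> simp [h1, h3]
  exact key (b.length - l) l le_rfl hl

-- A's match = B's match, except on the (excluded) pair of empty strings
lemma match_eq (u b : String) (h : b = "" → u ≠ "") :
    aMatchLoop u.toList b.toList 0 = bMatch u b := by
  by_cases hlen : u.toList.length = b.toList.length
  · have hb : b.toList ≠ [] := by
      intro hnil
      have hb' : b = "" := String.toList_eq_nil_iff.mp hnil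
      have hu' : u = "" := String.toList_eq_nil_iff.mp
        (List.length_eq_zero_iff.mp (by rw [hlen, hnil]; rfl))
      exact h hb' hu'
    have hpos : 0 < b.toList.length := List.length_pos_iff.mpr hb
    rw [aMatchLoop_eq_all _ _ hlen 0 hpos]
    have hbeq : (u.toList.length == b.toList.length) = true := by simp [hlen]
    simp only [bMatch, hbeq, Bool.true_and, List.drop_zero]
  · rw [aMatchLoop_len_ne _ _ hlen 0]
    have hbeq : (u.toList.length == b.toList.length) = false := by simp only [beq_eq_false_iff_ne, ne_eq]; exact hlen
    simp only [bMatch, hbeq, Bool.false_and]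

-- one user's pass over all patterns, ids component only
def stepIds (banned : List String) (u : String) (ids : List (List String)) : List (List String) :=
  (PySem.List.pyRange 0 (PySem.List.len banned) 1).foldl (fun st j =>
    if aMatchLoop u.toList (PySem.List.pyGetD banned j "").toList 0 then
      PySem.List.pySetD st j (PySem.List.pyGetD st j [] ++ [u])
    else st) ids

lemma stepIds_eq (banned : List String) (u : String) (ids : List (List String))
    (h : ids.length = banned.length) :
    stepIds banned u ids =
      ids.mapIdx (fun k x =>
        if aMatchLoop u.toList ((banned.getD k "").toList) 0 then x ++ [u] else x) := by
  have key : ∀ (q : Int → Bool) (n : Nat) (ss : List (List String)), n ≤ ss.length →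
      (PySem.List.pyRange 0 (n : Int) 1).foldl (fun st j =>
        if q j then PySem.List.pySetD st j (PySem.List.pyGetD st j [] ++ [u]) else st) ss
      = ss.mapIdx (fun k x => if k < n ∧ q (k : Int) then x ++ [u] else x) := by
    intro q n
    induction n with
    | zero =>
      intro ss hn
      rw [show ((0 : Nat) : Int) = 0 by norm_num, PySem.List.pyRange_one_eq_nil le_rfl]
      apply List.ext_getElem (by simp)
      intro k h1 h2
      simp [List.getElem_mapIdx]
    | succ n ih =>
      intro ss hn
      rw [show ((n + 1 : Nat) : Int) = (n : Int) + 1 by push_cast; ring,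
        PySem.List.pyRange_one_succ_right (by positivity), List.foldl_append, List.foldl_cons,
        List.foldl_nil, ih ss (by omega)]
      set R := ss.mapIdx (fun k x => if k < n ∧ q (k : Int) then x ++ [u] else x) with hR
      have hRlen : R.length = ss.length := by simp [hR]
      have hnR : n < R.length := by omega
      have hget : PySem.List.pyGetD R (n : Int) [] = ss[n] := by
        rw [PySem.List.pyGetD_natCast, List.getD_eq_getElem R [] hnR]
        simp only [hR, List.getElem_mapIdx]
        rw [if_neg (by omega)]
        rfl
      by_cases hq : q (n : Int)
      · rw [if_pos hq, PySem.List.pySetD_natCast, hget]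
        apply List.ext_getElem (by simp [hR])
        intro k h1 h2
        rw [List.getElem_set]
        simp only [hR, List.getElem_mapIdx]
        by_cases hk : n = k
        · subst hk
          rw [if_pos rfl, if_pos ⟨by omega, hq⟩]
          rfl
        · rw [if_neg hk]
          exact if_congr (and_congr_left' (by omega)) rfl rfl
      · rw [if_neg hq]
        apply List.ext_getElem (by simp [hR])
        intro k h1 h2
        simp only [hR, List.getElem_mapIdx]
        by_cases hk : k = n
        · subst hk
          rw [if_neg (fun hc => absurd hc.1 (by omega)), if_neg (fun hc => hq hc.2)]
        · exact if_congr (and_congr_left' (by omega)) rfl rfl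
  unfold stepIds
  rw [PySem.List.len_eq,
    key (fun j => aMatchLoop u.toList (PySem.List.pyGetD banned j "").toList 0) banned.length ids
      (by omega)]
  apply List.ext_getElem (by simp)
  intro k h1 h2
  rw [List.getElem_mapIdx, List.getElem_mapIdx]
  have hk : k < banned.length := by
    have := h2
    simp only [List.length_mapIdx] at this
    omega
  simp only [PySem.List.pyGetD_natCast]
  by_cases hq : aMatchLoop u.toList ((banned.getD k "").toList) 0
  · rw [if_pos ⟨hk, hq⟩, if_pos hq]
  · rw [if_neg (fun hc => hq hc.2), if_neg hq]

lemma foldl_stepIds (banned : List String) (us : List String) :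
    ∀ ids : List (List String), ids.length = banned.length →
      us.foldl (fun st u => stepIds banned u st) ids =
        ids.mapIdx (fun k x =>
          x ++ us.filter (fun u => aMatchLoop u.toList ((banned.getD k "").toList) 0)) := by
  induction us with
  | nil =>
    intro ids h
    apply List.ext_getElem (by simp)
    intro k h1 h2
    simp [List.getElem_mapIdx]
  | cons u us ih =>
    intro ids h
    rw [List.foldl_cons, stepIds_eq banned u ids h, ih _ (by simp [h])]
    apply List.ext_getElem (by simp)
    intro k h1 h2
    simp only [List.getElem_mapIdx, List.filter_cons]
    by_cases hq : aMatchLoop u.toList ((banned.getD k "").toList) 0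
    · rw [if_pos hq, if_pos hq]
      simp [List.append_assoc]
    · rw [if_neg hq, if_neg hq]

-- the double loop of A collects exactly the per-pattern candidate lists
lemma ban_id_eq (user_id banned_id : List String) :
    ((PySem.List.pyRange 0 (PySem.List.len user_id) 1).foldl (fun st i =>
      let u := PySem.List.pyGetD user_id i ""
      (PySem.List.pyRange 0 (PySem.List.len banned_id) 1).foldl (fun st j =>
        if aMatchLoop u.toList (PySem.List.pyGetD banned_id j "").toList 0 then
          (PySem.List.pySetD st.1 j (PySem.List.pyGetD st.1 j 0 + 1),
           PySem.List.pySetD st.2 j (PySem.List.pyGetD st.2 j [] ++ [u]))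
        else st) st)
      ((PySem.List.pyRange 0 (PySem.List.len banned_id) 1).foldl (fun acc _ => acc ++ [(0 : Int)]) [],
       (PySem.List.pyRange 0 (PySem.List.len banned_id) 1).map (fun _ => ([] : List String)))).2
    = banned_id.map (fun b => user_id.filter (fun u => aMatchLoop u.toList b.toList 0)) := by
  have hsplit : ∀ (u : String) (st : List Int × List (List String)),
      (PySem.List.pyRange 0 (PySem.List.len banned_id) 1).foldl (fun st j =>
        if aMatchLoop u.toList (PySem.List.pyGetD banned_id j "").toList 0 then
          (PySem.List.pySetD st.1 j (PySem.List.pyGetD st.1 j 0 + 1),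
           PySem.List.pySetD st.2 j (PySem.List.pyGetD st.2 j [] ++ [u]))
        else st) st
      = ((PySem.List.pyRange 0 (PySem.List.len banned_id) 1).foldl (fun s j =>
            if aMatchLoop u.toList (PySem.List.pyGetD banned_id j "").toList 0 then
              PySem.List.pySetD s j (PySem.List.pyGetD s j 0 + 1) else s) st.1,
         stepIds banned_id u st.2) := by
    intro u st
    have hfun : (fun (st : List Int × List (List String)) (j : Int) =>
        if aMatchLoop u.toList (PySem.List.pyGetD banned_id j "").toList 0 then
          (PySem.List.pySetD st.1 j (PySem.List.pyGetD st.1 j 0 + 1),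
           PySem.List.pySetD st.2 j (PySem.List.pyGetD st.2 j [] ++ [u]))
        else st)
        = (fun st j =>
          ((fun (s : List Int) (j : Int) =>
              if aMatchLoop u.toList (PySem.List.pyGetD banned_id j "").toList 0 then
                PySem.List.pySetD s j (PySem.List.pyGetD s j 0 + 1) else s) st.1 j,
           (fun (s : List (List String)) (j : Int) =>
              if aMatchLoop u.toList (PySem.List.pyGetD banned_id j "").toList 0 then
                PySem.List.pySetD s j (PySem.List.pyGetD s j [] ++ [u]) else s) st.2 j)) := by
      funext st j
      by_cases hc : aMatchLoop u.toList (PySem.List.pyGetD banned_id j "").toList 0 <;> simp [hc]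
    rw [hfun]
    cases st with
    | mk a b =>
      rw [PySem.List.foldl_prod_mk
        (f := fun (s : List Int) (j : Int) =>
          if aMatchLoop u.toList (PySem.List.pyGetD banned_id j "").toList 0 then
            PySem.List.pySetD s j (PySem.List.pyGetD s j 0 + 1) else s)
        (g := fun (s : List (List String)) (j : Int) =>
          if aMatchLoop u.toList (PySem.List.pyGetD banned_id j "").toList 0 then
            PySem.List.pySetD s j (PySem.List.pyGetD s j [] ++ [u]) else s)]
      rfl
  have houter : (fun (st : List Int × List (List String)) (i : Int) =>
      let u := PySem.List.pyGetD user_id i ""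
      (PySem.List.pyRange 0 (PySem.List.len banned_id) 1).foldl (fun st j =>
        if aMatchLoop u.toList (PySem.List.pyGetD banned_id j "").toList 0 then
          (PySem.List.pySetD st.1 j (PySem.List.pyGetD st.1 j 0 + 1),
           PySem.List.pySetD st.2 j (PySem.List.pyGetD st.2 j [] ++ [u]))
        else st) st)
      = (fun st i =>
        ((fun (s : List Int) (i : Int) =>
            (PySem.List.pyRange 0 (PySem.List.len banned_id) 1).foldl (fun s j =>
              if aMatchLoop (PySem.List.pyGetD user_id i "").toList
                  (PySem.List.pyGetD banned_id j "").toList 0 then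
                PySem.List.pySetD s j (PySem.List.pyGetD s j 0 + 1) else s) s) st.1 i,
         (fun (s : List (List String)) (i : Int) =>
            stepIds banned_id (PySem.List.pyGetD user_id i "") s) st.2 i)) := by
    funext st i
    exact hsplit _ st
  rw [houter, PySem.List.foldl_prod_mk
    (f := fun (s : List Int) (i : Int) =>
      (PySem.List.pyRange 0 (PySem.List.len banned_id) 1).foldl (fun s j =>
        if aMatchLoop (PySem.List.pyGetD user_id i "").toList
            (PySem.List.pyGetD banned_id j "").toList 0 then
          PySem.List.pySetD s j (PySem.List.pyGetD s j 0 + 1) else s) s)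
    (g := fun (s : List (List String)) (i : Int) =>
      stepIds banned_id (PySem.List.pyGetD user_id i "") s)]
  have hlen0 : ((PySem.List.pyRange 0 (PySem.List.len banned_id) 1).map
      (fun _ => ([] : List String))).length = banned_id.length := by
    simp [PySem.List.length_pyRange_one]
  rw [show ((PySem.List.pyRange 0 (PySem.List.len user_id) 1).foldl
        (fun (s : List (List String)) (i : Int) =>
          stepIds banned_id (PySem.List.pyGetD user_id i "") s)
        ((PySem.List.pyRange 0 (PySem.List.len banned_id) 1).map (fun _ => ([] : List String))))
      = (user_id.foldl (fun s u => stepIds banned_id u s)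
        ((PySem.List.pyRange 0 (PySem.List.len banned_id) 1).map (fun _ => ([] : List String)))) from by
    rw [PySem.List.len_eq user_id]
    exact PySem.List.foldl_pyRange_zero_pyGetD' user_id "" (fun s u => stepIds banned_id u s) _]
  rw [foldl_stepIds banned_id user_id _ hlen0]
  apply List.ext_getElem (by simp [PySem.List.length_pyRange_one])
  intro k h1 h2
  have hk : k < banned_id.length := by simpa using h2
  rw [List.getElem_mapIdx, List.getElem_map]
  simp [List.getElem?_eq_getElem hk]

lemma mem_pyProduct (cs : List (List String)) (a : List String) :
    a ∈ pyProduct cs ↔ List.Forall₂ (· ∈ ·) a cs := by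
  induction cs generalizing a with
  | nil => simp [pyProduct, List.forall₂_nil_right_iff]
  | cons xs rest ih =>
    simp only [pyProduct, List.mem_flatMap, List.mem_map, List.forall₂_cons_right_iff]
    constructor
    · rintro ⟨x, hx, t, ht, rfl⟩
      exact ⟨x, t, hx, (ih t).mp ht, rfl⟩
    · rintro ⟨x, t, hx, ht, rfl⟩
      exact ⟨x, hx, t, (ih t).mpr ht, rfl⟩

lemma len_ofList_eq_iff (a : List String) :
    (PySem.Set.ofList a).length = a.length ↔ a.Nodup := by
  constructor
  · intro h
    have hperm : (PySem.Set.ofList a).Perm a.dedup := by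
      rw [List.perm_ext_iff_of_nodup (PySem.Set.nodup_ofList a) a.nodup_dedup]
      intro x
      rw [PySem.Set.mem_ofList, List.mem_dedup]
    have hlen : a.dedup.length = a.length := by rw [← hperm.length_eq, h]
    exact List.dedup_eq_self.mp ((List.dedup_sublist a).eq_of_length hlen)
  · intro h
    rw [PySem.Set.ofList_eq_self_of_nodup a h]

lemma dfs_nodup (rest : List (List String)) (chosen : List String)
    (found : PySem.Set (List String)) (h : found.Nodup) : (dfs rest chosen found).Nodup := by
  induction rest generalizing chosen found with
  | nil => exact PySem.Set.nodup_add _ _ h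
  | cons cs rest ih =>
    show (cs.foldl (fun fd u => if chosen.contains u then fd else dfs rest (chosen ++ [u]) fd)
      found).Nodup
    refine List.foldlRecOn cs _ h (fun fd hfd u _ => ?_)
    by_cases hc : u ∈ chosen
    · rw [if_pos (by simpa using hc)]
      exact hfd
    · rw [if_neg (by simpa using hc)]
      exact ih _ _ hfd

lemma dfs_mem (rest : List (List String)) (chosen : List String)
    (found : PySem.Set (List String)) (c : List String) (hch : chosen.Nodup) :
    c ∈ dfs rest chosen found ↔
      c ∈ found ∨ ∃ t, List.Forall₂ (· ∈ ·) t rest ∧ (chosen ++ t).Nodup ∧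
        pyFrozenset (chosen ++ t) = c := by
  induction rest generalizing chosen found with
  | nil =>
    simp [dfs, PySem.Set.mem_add, List.forall₂_nil_right_iff, hch, eq_comm]
  | cons cs rest ih =>
    have inner : ∀ (cs' : List String) (found : PySem.Set (List String)),
        c ∈ cs'.foldl (fun fd u =>
            if chosen.contains u then fd else dfs rest (chosen ++ [u]) fd) found ↔
          c ∈ found ∨ ∃ u ∈ cs', u ∉ chosen ∧ ∃ t', List.Forall₂ (· ∈ ·) t' rest ∧
            ((chosen ++ [u]) ++ t').Nodup ∧ pyFrozenset ((chosen ++ [u]) ++ t') = c := by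
      intro cs'
      induction cs' with
      | nil => intro found; simp
      | cons u cs' ihc =>
        intro found
        rw [List.foldl_cons, ihc]
        by_cases hc : chosen.contains u
        · have hmem : u ∈ chosen := by simpa using hc
          rw [if_pos hc]
          constructor
          · rintro (h | ⟨u', hu', hni, rest'⟩)
            · exact Or.inl h
            · exact Or.inr ⟨u', List.mem_cons_of_mem _ hu', hni, rest'⟩
          · rintro (h | ⟨u', hu', hni, rest'⟩)
            · exact Or.inl h
            · rcases List.mem_cons.mp hu' with rfl | hu''
              · exact absurd hmem hni
              · exact Or.inr ⟨u', hu'', hni, rest'⟩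
        · have hmem : u ∉ chosen := by simpa using hc
          have hnd : (chosen ++ [u]).Nodup := by
            rw [List.nodup_append]
            exact ⟨hch, List.nodup_singleton u, fun a ha b hb =>
              by rcases List.mem_singleton.mp hb with rfl; exact fun hab => hmem (hab ▸ ha)⟩
          rw [if_neg hc, ih (chosen ++ [u]) found hnd]
          constructor
          · rintro ((h | ⟨t', hf, hnd', hcanon⟩) | ⟨u', hu', hni, rest'⟩)
            · exact Or.inl h
            · exact Or.inr ⟨u, List.mem_cons_self, hmem, t', hf, hnd', hcanon⟩
            · exact Or.inr ⟨u', List.mem_cons_of_mem _ hu', hni, rest'⟩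
          · rintro (h | ⟨u', hu', hni, rest'⟩)
            · exact Or.inl (Or.inl h)
            · rcases List.mem_cons.mp hu' with rfl | hu''
              · exact Or.inl (Or.inr rest')
              · exact Or.inr ⟨u', hu'', hni, rest'⟩
    show c ∈ cs.foldl (fun fd u =>
        if chosen.contains u then fd else dfs rest (chosen ++ [u]) fd) found ↔ _
    rw [inner cs found]
    constructor
    · rintro (h | ⟨u, hu, hni, t', hf, hnd, hcanon⟩)
      · exact Or.inl h
      · refine Or.inr ⟨u :: t', List.Forall₂.cons hu hf, ?_, ?_⟩
        · simpa [List.append_assoc] using hnd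
        · simpa [List.append_assoc] using hcanon
    · rintro (h | ⟨t, hf, hnd, hcanon⟩)
      · exact Or.inl h
      · rcases List.forall₂_cons_right_iff.mp hf with ⟨u, t', hu, hf', rfl⟩
        refine Or.inr ⟨u, hu, ?_, t', hf', ?_, ?_⟩
        · intro hmem
          exact (List.nodup_append.mp hnd).2.2 u hmem u (List.mem_cons_self) rfl
        · simpa [List.append_assoc] using hnd
        · simpa [List.append_assoc] using hcanon

-- ===== VERDICT (by name: the statement is the Claim_ definition above) =====
theorem solution_spec : Claim_equal_solution := by
  intro user_id banned_id hdom hpre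
  unfold Spec_solution
  simp only [solution, solution_alt]
  rw [ban_id_eq user_id banned_id]
  -- under Pre_, A's per-character match agrees with B's zip-based match
  have hfilters : banned_id.map (fun b => user_id.filter (fun u => aMatchLoop u.toList b.toList 0))
      = banned_id.map (fun b => user_id.filter (fun u => bMatch u b)) := by
    apply List.map_congr_left
    intro b hb
    apply List.filter_congr
    intro u hu
    apply match_eq
    intro hbe hue
    exact hpre ⟨hbe ▸ hb, hue ▸ hu⟩
  rw [hfilters]
  rw [PySem.List.len_eq, PySem.List.len_eq]
  congr 1
  apply List.Perm.length_eq
  rw [List.perm_ext_iff_of_nodup (PySem.Set.nodup_ofList _)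
    (dfs_nodup _ [] PySem.Set.empty List.nodup_nil)]
  intro c
  rw [PySem.Set.mem_ofList, dfs_mem _ [] PySem.Set.empty _ List.nodup_nil]
  simp only [List.mem_map, List.mem_filter, mem_pyProduct, List.nil_append]
  have hempty : c ∉ (PySem.Set.empty : PySem.Set (List String)) := List.not_mem_nil
  constructor
  · rintro ⟨a, ⟨hf, hcond⟩, hcanon⟩
    have hlen : a.length = banned_id.length := by simpa using hf.length_eq
    have hnd : a.Nodup := by
      rw [beq_iff_eq, PySem.List.len_eq] at hcond
      have : (pyFrozenset a).length = banned_id.length := by exact_mod_cast hcond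
      rw [pyFrozenset, List.length_mergeSort] at this
      exact (len_ofList_eq_iff a).mp (by omega)
    refine Or.inr ⟨a, ?_, hnd, hcanon⟩
    rw [List.forall₂_map_right_iff] at hf ⊢
    refine hf.imp (fun x b hx => ?_)
    simp only [List.mem_filter, PySem.List.mem_dedup] at hx ⊢
    exact hx
  · rintro (hc | ⟨t, hf, hnd, hcanon⟩)
    · exact absurd hc hempty
    · have hlen : t.length = banned_id.length := by simpa using hf.length_eq
      refine ⟨t, ⟨?_, ?_⟩, hcanon⟩
      · rw [List.forall₂_map_right_iff] at hf ⊢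
        refine hf.imp (fun x b hx => ?_)
        simp only [List.mem_filter, PySem.List.mem_dedup] at hx ⊢
        exact hx
      · rw [beq_iff_eq, PySem.List.len_eq]
        have : (pyFrozenset t).length = banned_id.length := by
          rw [pyFrozenset, List.length_mergeSort]
          rw [(len_ofList_eq_iff t).mpr hnd, hlen]
        exact_mod_cast this
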